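-- pv_equiv track=rewrite | github.com/DanielKluev/pyFade | py_fade/gui/components/widget_completion.py | _check_logprobs_cover_text
-- ===== SOURCE A (Python) =====
-- def _check_logprobs_cover_text(text: str, logprobs: list) -> bool:
--     """Check if logprobs tokens cover the full text."""
--     if not logprobs or not text:
--         return False
--
--     text_pos = 0
--     for logprob_entry in logprobs:
--         token = logprob_entry.get("token", "")
--         if not token:
--             return False
--
--         # Check if token matches the text at current position
--         if text_pos + len(token) > len(text):
--             return False
--         if text[text_pos:text_pos + len(token)] != token:
--             return False
--
--         text_pos += len(token)
--
--     return text_pos == len(text)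
-- ===== SOURCE B (Python) =====
-- def _check_logprobs_cover_text(text: str, logprobs: list) -> bool:
--     """Check if logprobs tokens cover the full text (build-then-compare)."""
--     if not logprobs or not text:
--         return False
--     tokens = [entry.get("token", "") for entry in logprobs]
--     if any(not t for t in tokens):
--         return False
--     return "".join(tokens) == text
-- ===== Notes on version B (the rewrite author's own statement) =====
-- stated objective: simpler
-- what changed: Replaces the position-cursor streaming match (slice-compare at a running offset with three early-return checks per entry) by a build-then-compare decomposition: collect all tokens, reject any falsy token, then compare the single join against the text.
import Mathlib
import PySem

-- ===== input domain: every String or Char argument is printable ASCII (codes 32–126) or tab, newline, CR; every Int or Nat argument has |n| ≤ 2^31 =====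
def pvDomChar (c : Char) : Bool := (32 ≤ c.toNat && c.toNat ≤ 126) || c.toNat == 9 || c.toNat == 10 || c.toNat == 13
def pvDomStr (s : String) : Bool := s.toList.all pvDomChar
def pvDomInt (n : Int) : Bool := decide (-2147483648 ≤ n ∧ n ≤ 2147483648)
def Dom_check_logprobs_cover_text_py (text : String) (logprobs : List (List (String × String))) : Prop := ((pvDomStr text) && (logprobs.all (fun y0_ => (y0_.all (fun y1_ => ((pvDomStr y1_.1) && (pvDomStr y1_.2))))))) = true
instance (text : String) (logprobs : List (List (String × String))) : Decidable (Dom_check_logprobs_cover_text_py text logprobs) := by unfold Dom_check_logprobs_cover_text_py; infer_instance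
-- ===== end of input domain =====

-- B replaces A's position-cursor streaming match with a build-then-compare pass (simpler decomposition; return value equivalence, no side effects involved).

-- ===== PORT A =====
-- entry.get("token", "") : first-match lookup in the association list (Python dict lookup)
def pvTok (e : List (String × String)) : String := (PySem.Dict.mk e).getD "token" ""

-- A's for-loop over logprobs with the running cursor text_pos; strings handled via toList
-- (len / slice / equality on the char list are exact for Python str on the ASCII domain).
def pyALoop (chars : List Char) (entries : List (List (String × String))) (pos : Nat) : Bool :=
  match entries with
  | [] => pos == chars.length
  | e :: rest =>
    let token := (pvTok e).toList
    if token.isEmpty then false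
    else if pos + token.length > chars.length then false
    else if PySem.List.slice chars (some (pos : Int)) (some ((pos : Int) + (token.length : Int))) ≠ token then false
    else pyALoop chars rest (pos + token.length)

def check_logprobs_cover_text_py (text : String) (logprobs : List (List (String × String))) : Bool :=
  if logprobs.isEmpty || text.toList.isEmpty then false
  else pyALoop text.toList logprobs 0

-- ===== PORT B =====
def check_logprobs_cover_text_py_alt (text : String) (logprobs : List (List (String × String))) : Bool :=
  if logprobs.isEmpty || text.toList.isEmpty then false
  else
    let tokens := logprobs.map pvTok
    if tokens.any (fun t => t.toList.isEmpty) then false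
    else tokens.flatMap (·.toList) == text.toList   -- "".join(tokens) == text

-- ===== PRECONDITION & SPEC =====
def Spec_check_logprobs_cover_text_py (text : String) (logprobs : List (List (String × String))) (out : Bool) : Prop := out = check_logprobs_cover_text_py_alt text logprobs
instance (text : String) (logprobs : List (List (String × String))) (out : Bool) : Decidable (Spec_check_logprobs_cover_text_py text logprobs out) := by unfold Spec_check_logprobs_cover_text_py; infer_instance

-- ===== CLAIM (what is proved, stated in full; the proofs are below) =====
def Claim_equal_check_logprobs_cover_text_py : Prop := ∀ (text : String) (logprobs : List (List (String × String))), Dom_check_logprobs_cover_text_py text logprobs → Spec_check_logprobs_cover_text_py text logprobs (check_logprobs_cover_text_py text logprobs)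

-- ===== LEMMAS AND PROOFS =====

-- A's cursor loop equals B's "no empty token and the joined tokens are the remaining text".
theorem pyALoop_eq (chars : List Char) (entries : List (List (String × String))) (pos : Nat)
    (hpos : pos ≤ chars.length) :
    pyALoop chars entries pos =
      (if (entries.map pvTok).any (fun t => t.toList.isEmpty) then false
       else (entries.map pvTok).flatMap (·.toList) == chars.drop pos) := by
  induction entries generalizing pos with
  | nil =>
    simp only [pyALoop, List.map_nil, List.any_nil, List.flatMap_nil, Bool.false_eq_true, if_false]
    by_cases h : pos = chars.length
    · simp [h]
    · have hlt : pos < chars.length := lt_of_le_of_ne hpos h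
      have hne : chars.drop pos ≠ [] := by
        simp only [ne_eq, List.drop_eq_nil_iff]; omega
      cases hd : chars.drop pos with
      | nil => exact absurd hd hne
      | cons c cs => simp [h]
  | cons e rest ih =>
    simp only [pyALoop, List.map_cons, List.any_cons, List.flatMap_cons]
    set t := (pvTok e).toList with ht
    by_cases h1 : t.isEmpty
    · simp [h1]
    · simp only [h1, Bool.false_or]
      by_cases h2 : pos + t.length > chars.length
      · rw [if_pos h2]
        have hlen : (chars.drop pos).length < t.length := by
          simp only [List.length_drop]; omega
        have hfalse : (t ++ (rest.map pvTok).flatMap (fun x => x.toList) == chars.drop pos) = false := by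
          rw [beq_eq_false_iff_ne]
          intro hEq
          have := congrArg List.length hEq
          simp only [List.length_append] at this
          omega
        cases hany : (rest.map pvTok).any (fun t => t.toList.isEmpty) <;>
          simp [hfalse]
      · rw [if_neg h2]
        rw [PySem.List.slice_natCast_add]
        have happ : ∀ (a b : List Char), (t ++ a == t ++ b) = (a == b) := by
          intro a b
          cases h : a == b with
          | true => rw [beq_iff_eq] at h; simp [h]
          | false =>
            rw [beq_eq_false_iff_ne] at h
            rw [beq_eq_false_iff_ne.2 (by simpa using h)]
        by_cases h3 : (chars.drop pos).take t.length = t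
        · have hcond : ¬ ((chars.drop pos).take t.length ≠ t) := by simpa using h3
          have hdrop : chars.drop pos = t ++ chars.drop (pos + t.length) := by
            conv_lhs => rw [← List.take_append_drop t.length (chars.drop pos)]
            rw [h3, List.drop_drop]
          rw [if_neg hcond, ih (pos + t.length) (by omega), hdrop]
          cases hany : (rest.map pvTok).any (fun t => t.toList.isEmpty) with
          | true => simp
          | false =>
            simp only [Bool.false_eq_true, if_false]
            rw [happ]
        · rw [if_pos h3]
          have hfalse : (t ++ (rest.map pvTok).flatMap (fun x => x.toList) == chars.drop pos) = false := by
            rw [beq_eq_false_iff_ne]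
            intro hEq
            apply h3
            rw [← hEq, List.take_append_of_le_length (le_refl _), List.take_length]
          cases hany : (rest.map pvTok).any (fun t => t.toList.isEmpty) <;>
            simp [hfalse]

-- ===== VERDICT (by name: the statement is the Claim_ definition above) =====
theorem check_logprobs_cover_text_py_spec : Claim_equal_check_logprobs_cover_text_py := by
  intro text logprobs _
  unfold Spec_check_logprobs_cover_text_py check_logprobs_cover_text_py check_logprobs_cover_text_py_alt
  by_cases hE : logprobs.isEmpty || text.toList.isEmpty
  · simp [hE]
  · rw [if_neg hE, if_neg hE]
    rw [pyALoop_eq text.toList logprobs 0 (Nat.zero_le _)]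
    simp
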